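-- pv_equiv track=rewrite | github.com/christophejacques/examples | tests/activemq.py | attributs_match_ident
-- ===== SOURCE A (Python) =====
-- def attributs_match_ident(attributs_actuels: list, data_attrs: list) -> bool:
--     trouve = False
--
--     # recherche si un des attributs est "classe""
--     for attribut, valeurs in attributs_actuels:
--         if attribut == "id":
--             trouve = True
--
--             # recherche dans l'attribut "id" trouvé
--             # s'il contient l'identifiant demandé
--             for un_id in data_attrs:
--                 if un_id not in valeurs.split():
--                     # une des classes n'est pas trouvée
--                     # le résultat est donc faux
--                     return False
--
--     return trouve
-- ===== SOURCE B (Python) =====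
-- def attributs_match_ident(attributs_actuels: list, data_attrs: list) -> bool:
--     # build-then-test: collect the word-set of every "id" attribute,
--     # fold them into their intersection, and test subset once
--     id_sets = [set(valeurs.split()) for attribut, valeurs in attributs_actuels
--                if attribut == "id"]
--     if not id_sets:
--         return False
--     common = id_sets[0]
--     for s in id_sets[1:]:
--         common &= s
--     return set(data_attrs) <= common
-- ===== Notes on version B (the rewrite author's own statement) =====
-- stated objective: simpler
-- what changed: Replaces the interleaved scan with early-return inner loop and a 'trouve' flag by a build-then-test shape: collect word-sets of all id attributes, fold them into one intersection, and do a single subset test.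
import Mathlib
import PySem

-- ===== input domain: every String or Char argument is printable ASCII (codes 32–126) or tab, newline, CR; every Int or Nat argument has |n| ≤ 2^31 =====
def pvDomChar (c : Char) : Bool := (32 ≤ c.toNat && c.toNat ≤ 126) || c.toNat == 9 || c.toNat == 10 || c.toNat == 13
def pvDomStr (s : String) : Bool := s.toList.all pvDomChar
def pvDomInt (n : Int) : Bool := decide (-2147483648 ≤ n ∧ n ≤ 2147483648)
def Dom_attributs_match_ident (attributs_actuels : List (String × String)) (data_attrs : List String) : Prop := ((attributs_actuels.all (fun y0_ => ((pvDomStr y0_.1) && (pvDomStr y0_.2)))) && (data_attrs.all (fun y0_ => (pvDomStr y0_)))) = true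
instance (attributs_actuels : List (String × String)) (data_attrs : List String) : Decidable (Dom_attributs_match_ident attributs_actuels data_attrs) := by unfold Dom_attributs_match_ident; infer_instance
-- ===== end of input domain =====

-- B replaces A's interleaved scan-with-flag and early-return inner loop by a
-- build-then-test shape (collect id word-sets, fold their intersection, one
-- subset test): simpler decomposition, same cost.


-- ===== PORT A =====
-- the outer 'for attribut, valeurs in attributs_actuels' loop carrying 'trouve';
-- the inner 'for un_id in data_attrs: if un_id not in valeurs.split(): return False'
-- is the early-exit membership check written as '.all … .contains'
def amiLoopA (data_attrs : List String) : List (String × String) → Bool → Bool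
  | [], trouve => trouve
  | (attribut, valeurs) :: rest, trouve =>
    if attribut == "id" then
      if data_attrs.all (fun un_id => (PySem.Str.split₀ valeurs).contains un_id) then
        amiLoopA data_attrs rest true
      else false
    else amiLoopA data_attrs rest trouve

def attributs_match_ident (attributs_actuels : List (String × String)) (data_attrs : List String) : Bool :=
  amiLoopA data_attrs attributs_actuels false

-- ===== PORT B =====
def attributs_match_ident_alt (attributs_actuels : List (String × String)) (data_attrs : List String) : Bool :=
  let id_sets := (attributs_actuels.filter (fun p => p.1 == "id")).map
      (fun p => PySem.Set.ofList (PySem.Str.split₀ p.2))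
  match id_sets with
  | [] => false
  | s :: rest =>
    let common := rest.foldl (fun c t => PySem.Set.inter c t) s
    PySem.Set.issubset (PySem.Set.ofList data_attrs) common

-- ===== PRECONDITION & SPEC =====
def Spec_attributs_match_ident (attributs_actuels : List (String × String)) (data_attrs : List String) (out : Bool) : Prop := out = attributs_match_ident_alt attributs_actuels data_attrs
instance (attributs_actuels : List (String × String)) (data_attrs : List String) (out : Bool) : Decidable (Spec_attributs_match_ident attributs_actuels data_attrs out) := by unfold Spec_attributs_match_ident; infer_instance

-- ===== CLAIM (what is proved, stated in full; the proofs are below) =====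
def Claim_equal_attributs_match_ident : Prop := ∀ (attributs_actuels : List (String × String)) (data_attrs : List String), Dom_attributs_match_ident attributs_actuels data_attrs → Spec_attributs_match_ident attributs_actuels data_attrs (attributs_match_ident attributs_actuels data_attrs)

-- ===== LEMMAS AND PROOFS =====

-- the split word-lists of the "id" attributes
def amiIdVals (a : List (String × String)) : List (List String) :=
  (a.filter (fun p => p.1 == "id")).map (fun p => PySem.Str.split₀ p.2)

lemma mem_foldl_inter {α : Type} [BEq α] [LawfulBEq α] (x : α) (rest : List (List α))
    (s : List α) :
    x ∈ rest.foldl (fun c t => PySem.Set.inter c t) s ↔ x ∈ s ∧ ∀ t ∈ rest, x ∈ t := by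
  induction rest generalizing s with
  | nil => simp
  | cons t rest ih =>
      simp [List.foldl, ih, PySem.Set.mem_inter]
      tauto

lemma loopA_char (d : List String) (a : List (String × String)) (trouve : Bool) :
    amiLoopA d a trouve =
      ((trouve || !(amiIdVals a).isEmpty) &&
        (amiIdVals a).all (fun ws => d.all (fun x => ws.contains x))) := by
  induction a generalizing trouve with
  | nil => simp [amiLoopA, amiIdVals]
  | cons p rest ih =>
      obtain ⟨attr, v⟩ := p
      simp only [amiLoopA]
      by_cases h : (attr == "id") = true
      · rw [if_pos h]
        by_cases hP : (d.all fun un_id => (PySem.Str.split₀ v).contains un_id) = true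
        · rw [if_pos hP, ih]
          simp only [List.all_eq_true] at hP
          simp [amiIdVals, h]
          exact fun _ x hx => by simpa using hP x hx
        · rw [if_neg hP]
          simp only [List.all_eq_true, not_forall] at hP
          simp [amiIdVals, h, List.all_eq_true]
          intro hall
          obtain ⟨x, hx, hx2⟩ := hP
          exact absurd (hall x hx) (by simpa using hx2)
      · rw [if_neg h, ih]
        simp [amiIdVals, h]

lemma alt_char (a : List (String × String)) (d : List String) :
    attributs_match_ident_alt a d =
      ((!(amiIdVals a).isEmpty) &&
        (amiIdVals a).all (fun ws => d.all (fun x => ws.contains x))) := by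
  unfold attributs_match_ident_alt amiIdVals
  cases h : a.filter (fun p => p.1 == "id") with
  | nil => simp
  | cons p rest =>
      simp only [List.map_cons, List.isEmpty_cons, Bool.not_false, Bool.true_and]
      rw [Bool.eq_iff_iff]
      simp [PySem.Set.issubset_iff, PySem.Set.mem_ofList, mem_foldl_inter,
        List.all_eq_true, List.mem_map]
      constructor
      · intro h1
        constructor
        · exact fun x hx => (h1 x hx).1
        · intro a b hab x hx
          exact (by simpa using (h1 x hx).2 _ a b hab rfl : x ∈ PySem.Str.split₀ b)
      · rintro ⟨h1, h2⟩ x hx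
        refine ⟨h1 x hx, ?_⟩
        intro t a b hab ht
        subst ht
        simpa using h2 a b hab x hx

-- ===== VERDICT (by name: the statement is the Claim_ definition above) =====
theorem attributs_match_ident_spec : Claim_equal_attributs_match_ident := by
  intro a d _
  unfold Spec_attributs_match_ident attributs_match_ident
  rw [loopA_char, alt_char]
  simp
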